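-- pv_equiv track=rewrite | github.com/maDwaZz/test-tasks-codewars | did_you_mean.py | calculate_min_edit_distance
-- ===== SOURCE A (Python) =====
-- def calculate_min_edit_distance(str1, str2):
--     m = len(str1)
--     n = len(str2)
--     matrix = [[0] * (n + 1) for _ in range(m + 1)]
--
--     for i in range(m + 1):
--         matrix[i][0] = i
--     for j in range(n + 1):
--         matrix[0][j] = j
--
--     for i in range(1, m + 1):
--         for j in range(1, n + 1):
--             if str1[i - 1] == str2[j - 1]:
--                 matrix[i][j] = matrix[i - 1][j - 1]
--             else:
--                 matrix[i][j] = 1 + min(matrix[i - 1][j], matrix[i][j - 1], matrix[i - 1][j - 1])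
--
--     return matrix[m][n]
-- ===== SOURCE B (Python) =====
-- def calculate_min_edit_distance(str1, str2):
--     # Demand-driven top-down evaluation of the edit-distance recurrence:
--     # an explicit work stack plays the recursion, a dict memoizes subproblems,
--     # and an 'expanded' set marks frames whose dependencies are already pushed.
--     memo = {}
--     expanded = set()
--     stack = [(len(str1), len(str2))]
--     while stack:
--         i, j = stack[-1]
--         if (i, j) in memo:
--             stack.pop()
--         elif i == 0:
--             memo[(i, j)] = j
--             stack.pop()
--         elif j == 0:
--             memo[(i, j)] = i
--             stack.pop()
--         else:
--             if str1[i - 1] == str2[j - 1]: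
--                 deps = [(i - 1, j - 1)]
--             else:
--                 deps = [(i - 1, j), (i, j - 1), (i - 1, j - 1)]
--             missing = [d for d in deps if d not in memo]
--             if missing and (i, j) not in expanded:
--                 expanded.add((i, j))
--                 stack.extend(missing)
--             elif len(deps) == 1:
--                 memo[(i, j)] = memo[deps[0]]
--                 stack.pop()
--             else:
--                 memo[(i, j)] = 1 + min(memo[deps[0]], memo[deps[1]], memo[deps[2]])
--                 stack.pop()
--     return memo[(len(str1), len(str2))]
-- ===== Notes on version B (the rewrite author's own statement) =====
-- stated objective: alternative
-- what changed: B replaces A's bottom-up (m+1)x(n+1) matrix fill with demand-driven top-down evaluation: an explicit work stack plays the recursion on subproblems (i,j), a dict memoizes each subproblem once, and an 'expanded' set marks frames whose dependencies are already on the stack; A's row-major index loops and matrix disappear entirely.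
import Mathlib
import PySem

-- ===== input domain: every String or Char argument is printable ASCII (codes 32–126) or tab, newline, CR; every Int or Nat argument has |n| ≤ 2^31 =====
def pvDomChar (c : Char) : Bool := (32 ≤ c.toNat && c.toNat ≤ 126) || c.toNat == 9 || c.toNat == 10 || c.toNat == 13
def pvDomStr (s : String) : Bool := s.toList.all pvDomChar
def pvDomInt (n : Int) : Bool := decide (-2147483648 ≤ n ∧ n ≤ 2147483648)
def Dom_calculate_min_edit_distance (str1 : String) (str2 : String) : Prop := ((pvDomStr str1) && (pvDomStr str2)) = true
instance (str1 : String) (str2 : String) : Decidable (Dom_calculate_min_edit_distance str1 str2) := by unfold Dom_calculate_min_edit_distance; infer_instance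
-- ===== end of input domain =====

-- B replaces A's bottom-up matrix fill with demand-driven top-down evaluation: an explicit
-- work stack plays the recursion on subproblems (i, j), a dict memoizes each subproblem, and
-- an 'expanded' set marks frames whose dependencies are already pushed; same return value.

-- ===== PORT A =====
-- matrix[i][j] read / write helpers; every index A ever uses is nonnegative and in
-- range, so the defaulted get/set are exact here (A's Python never raises).
def pvGet2 (mat : List (List Int)) (i j : Int) : Int :=
  PySem.List.pyGetD (PySem.List.pyGetD mat i []) j 0

def pvSet2 (mat : List (List Int)) (i j : Int) (v : Int) : List (List Int) :=
  PySem.List.pySetD mat i (PySem.List.pySetD (PySem.List.pyGetD mat i []) j v)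

def calculate_min_edit_distance (str1 : String) (str2 : String) : Int :=
  let s1 := str1.toList
  let s2 := str2.toList
  let m : Int := s1.length
  let n : Int := s2.length
  -- matrix = [[0] * (n + 1) for _ in range(m + 1)]
  let matrix : List (List Int) :=
    (PySem.List.pyRange 0 (m+1) 1).map (fun _ => List.replicate (n+1).toNat (0:Int))
  -- for i in range(m + 1): matrix[i][0] = i
  let matrix := (PySem.List.pyRange 0 (m+1) 1).foldl (fun mat i => pvSet2 mat i 0 i) matrix
  -- for j in range(n + 1): matrix[0][j] = j
  let matrix := (PySem.List.pyRange 0 (n+1) 1).foldl (fun mat j => pvSet2 mat 0 j j) matrix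
  -- the nested fill loops
  let matrix := (PySem.List.pyRange 1 (m+1) 1).foldl (fun mat i =>
    (PySem.List.pyRange 1 (n+1) 1).foldl (fun mat j =>
      if PySem.List.pyGetD s1 (i-1) ' ' = PySem.List.pyGetD s2 (j-1) ' ' then
        pvSet2 mat i j (pvGet2 mat (i-1) (j-1))
      else
        pvSet2 mat i j (1 + min (min (pvGet2 mat (i-1) j) (pvGet2 mat i (j-1)))
                              (pvGet2 mat (i-1) (j-1)))) mat) matrix
  -- return matrix[m][n]
  pvGet2 matrix m n

-- ===== PORT B =====
-- the while loop of Source B: stack head = Python's stack[-1]; stack.extend(missing) pushes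
-- missing's elements so that its LAST element becomes the top, hence 'missing.reverse ++ …'.
-- The fuel argument only makes the recursion structural (5·(m+1)·(n+1)+1 steps always
-- suffice, proved below); it changes no computed value.
def pvRun (s t : List Char) : Nat → PySem.Dict (Int × Int) Int → PySem.Set (Int × Int) → List (Int × Int) → PySem.Dict (Int × Int) Int
  | 0, memo, _, _ => memo
  | _+1, memo, _, [] => memo
  | fuel+1, memo, exp, p :: rest =>
    if memo.contains p then
      pvRun s t fuel memo exp rest
    else if p.1 = 0 then
      pvRun s t fuel (memo.insert p p.2) exp rest
    else if p.2 = 0 then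
      pvRun s t fuel (memo.insert p p.1) exp rest
    else
      let deps : List (Int × Int) :=
        if PySem.List.pyGetD s (p.1 - 1) ' ' = PySem.List.pyGetD t (p.2 - 1) ' ' then
          [(p.1 - 1, p.2 - 1)]
        else
          [(p.1 - 1, p.2), (p.1, p.2 - 1), (p.1 - 1, p.2 - 1)]
      let missing := deps.filter (fun d => !memo.contains d)
      if missing ≠ [] ∧ PySem.Set.contains exp p = false then
        pvRun s t fuel memo (PySem.Set.add exp p) (missing.reverse ++ p :: rest)
      else if deps.length = 1 then
        pvRun s t fuel (memo.insert p (memo.getD (deps.getD 0 (0, 0)) 0)) exp rest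
      else
        pvRun s t fuel (memo.insert p (1 + min (min (memo.getD (deps.getD 0 (0, 0)) 0)
                                                    (memo.getD (deps.getD 1 (0, 0)) 0))
                                               (memo.getD (deps.getD 2 (0, 0)) 0))) exp rest

def calculate_min_edit_distance_alt (str1 : String) (str2 : String) : Int :=
  let s := str1.toList
  let t := str2.toList
  let memo := pvRun s t (5 * (s.length + 1) * (t.length + 1) + 1)
    PySem.Dict.empty PySem.Set.empty [((s.length : Int), (t.length : Int))]
  -- return memo[(len(str1), len(str2))] — the key is always present (proved below)
  memo.getD ((s.length : Int), (t.length : Int)) 0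

-- ===== PRECONDITION & SPEC =====
def Spec_calculate_min_edit_distance (str1 : String) (str2 : String) (out : Int) : Prop := out = calculate_min_edit_distance_alt str1 str2
instance (str1 : String) (str2 : String) (out : Int) : Decidable (Spec_calculate_min_edit_distance str1 str2 out) := by unfold Spec_calculate_min_edit_distance; infer_instance

-- ===== CLAIM (what is proved, stated in full; the proofs are below) =====
def Claim_equal_calculate_min_edit_distance : Prop := ∀ (str1 : String) (str2 : String), Dom_calculate_min_edit_distance str1 str2 → Spec_calculate_min_edit_distance str1 str2 (calculate_min_edit_distance str1 str2)

-- ===== LEMMAS AND PROOFS =====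

-- reference: edit distance between the length-i prefix of s and the length-j prefix of t,
-- with exactly the min-nesting both programs use
def pvEd (s t : List Char) : Nat → Nat → Int
  | 0, j => (j : Int)
  | i+1, 0 => (i : Int) + 1
  | i+1, j+1 =>
    if s.getD i ' ' = t.getD j ' ' then pvEd s t i j
    else 1 + min (min (pvEd s t i (j+1)) (pvEd s t (i+1) j)) (pvEd s t i j)
termination_by i j => (i, j)

-- ---------- A-side proof: A computes pvEd ----------

-- stage 2: the first init loop writes i into column 0 of each row, in order
lemma pvStage2 (mN nN : Nat) (k : Nat) (hk : k ≤ mN + 1) :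
    (List.range k).foldl (fun mat (i : Nat) => mat.set i ((mat.getD i []).set 0 (i:Int)))
      (List.replicate (mN+1) (List.replicate (nN+1) (0:Int)))
    = (List.range k).map (fun (i : Nat) => (i:Int) :: List.replicate nN 0)
      ++ List.replicate (mN+1-k) (List.replicate (nN+1) (0:Int)) := by
  induction k with
  | zero => simp
  | succ k ih =>
    rw [show List.range (k+1) = List.range k ++ [k] from List.range_succ,
        List.foldl_append, ih (by omega)]
    simp only [List.foldl_cons, List.foldl_nil]
    have hlenpre : ((List.range k).map (fun (i : Nat) => (i:Int) :: List.replicate nN 0)).length = k := by simp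
    have hrep : mN + 1 - k = (mN - k) + 1 := by omega
    have hgd : ((List.range k).map (fun (i : Nat) => (i:Int) :: List.replicate nN 0)
        ++ List.replicate (mN+1-k) (List.replicate (nN+1) (0:Int))).getD k [] = List.replicate (nN+1) (0:Int) := by
      rw [List.getD_eq_getElem?_getD, List.getElem?_append_right (by omega), hlenpre]
      simp [hrep]
    rw [hgd, List.set_append_right _ _ (by omega), hlenpre, Nat.sub_self]
    have hv : (List.replicate (nN+1) (0:Int)).set 0 (k:Int) = (k:Int) :: List.replicate nN 0 := by
      rw [List.replicate_succ, List.set_cons_zero]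
    rw [hv, hrep, List.replicate_succ, List.set_cons_zero]
    conv_rhs => rw [List.map_append]
    have hms : mN + 1 - (k+1) = mN - k := by omega
    rw [hms]; simp

-- stage 3: writes into row 0 only touch the head of the matrix
lemma pvStage3 (l : List Nat) (g : List Int → Nat → List Int) :
    ∀ (r : List Int) (rest : List (List Int)),
    l.foldl (fun mat (j : Nat) => mat.set 0 (g (mat.getD 0 []) j)) (r :: rest)
    = (l.foldl g r) :: rest := by
  induction l with
  | nil => intro r rest; simp
  | cons j l ih =>
    intro r rest
    simp only [List.foldl_cons, List.getD_cons_zero, List.set_cons_zero]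
    exact ih (g r j) rest

-- writing g j at index j for j < r.length, left to right
lemma pvFoldlSetRange (g : Nat → Int) (r : List Int) (k : Nat) (hk : k ≤ r.length) :
    (List.range k).foldl (fun row (j : Nat) => row.set j (g j)) r
    = (List.range k).map g ++ r.drop k := by
  induction k with
  | zero => simp
  | succ k ih =>
    rw [show List.range (k+1) = List.range k ++ [k] from List.range_succ,
        List.foldl_append, ih (by omega)]
    simp only [List.foldl_cons, List.foldl_nil]
    rw [List.set_append_right _ _ (by simp), List.map_append]
    simp only [List.length_map, List.length_range, Nat.sub_self]
    rw [List.drop_eq_getElem_cons (show k < r.length by omega), List.set_cons_zero]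
    simp

-- main fill, factored: the inner loop only rewrites row K+1, reading the frozen row K
lemma pvRowFactor (P : List Int → List Int → Nat → List Int) (l : List Nat) :
    ∀ (mat : List (List Int)) (K : Nat) (r : List Int), K + 1 < mat.length →
    l.foldl (fun m (k : Nat) => m.set (K+1) (P (m.getD K []) (m.getD (K+1) []) k)) (mat.set (K+1) r)
    = mat.set (K+1) (l.foldl (fun row k => P (mat.getD K []) row k) r) := by
  induction l with
  | nil => intro mat K r _; simp
  | cons k l ih =>
    intro mat K r hK
    simp only [List.foldl_cons]
    have h1 : (mat.set (K+1) r).getD K [] = mat.getD K [] := by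
      rw [List.getD_eq_getElem?_getD, List.getD_eq_getElem?_getD, List.getElem?_set_ne (by omega)]
    have h2 : (mat.set (K+1) r).getD (K+1) [] = r := by
      rw [List.getD_eq_getElem?_getD, List.getElem?_set_self (by omega)]
      rfl
    rw [h1, h2, List.set_set]
    exact ih mat K _ hK

-- the inner loop computes row K+1 of the distance table, left to right
lemma pvRowCompute (s t : List Char) (K : Nat) (k : Nat) (hk : k ≤ t.length) :
    (List.range k).foldl (fun row (j : Nat) =>
      if s.getD K ' ' = t.getD j ' ' then
        row.set (j+1) (((List.range (t.length+1)).map (fun j' => pvEd s t K j')).getD j 0)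
      else
        row.set (j+1) (1 + min (min (((List.range (t.length+1)).map (fun j' => pvEd s t K j')).getD (j+1) 0)
                                    (row.getD j 0))
                              (((List.range (t.length+1)).map (fun j' => pvEd s t K j')).getD j 0)))
      (((K:Int)+1) :: List.replicate t.length 0)
    = (List.range (k+1)).map (fun j => pvEd s t (K+1) j) ++ List.replicate (t.length - k) 0 := by
  induction k with
  | zero =>
    simp [pvEd]
  | succ k ih =>
    rw [show List.range (k+1) = List.range k ++ [k] from List.range_succ,
        List.foldl_append, ih (by omega)]
    simp only [List.foldl_cons, List.foldl_nil]
    have gPrev : ∀ j, j ≤ t.length →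
        ((List.range (t.length+1)).map (fun j' => pvEd s t K j')).getD j 0 = pvEd s t K j := by
      intro j hj
      rw [List.getD_eq_getElem _ _ (by simpa using Nat.lt_succ_of_le hj)]
      simp
    have gCur : ((List.range (k+1)).map (fun j => pvEd s t (K+1) j) ++ List.replicate (t.length - k) 0).getD k 0
        = pvEd s t (K+1) k := by
      rw [List.getD_eq_getElem?_getD, List.getElem?_append_left (by simp), List.getElem?_map]
      simp
    rw [gPrev k (by omega), gPrev (k+1) hk, gCur]
    have hrep : t.length - k = (t.length - (k+1)) + 1 := by omega
    have hsetv : ∀ v : Int,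
        ((List.range (k+1)).map (fun j => pvEd s t (K+1) j) ++ List.replicate (t.length - k) 0).set (k+1) v
        = (List.range (k+1)).map (fun j => pvEd s t (K+1) j) ++ v :: List.replicate (t.length - (k+1)) 0 := by
      intro v
      rw [List.set_append_right _ _ (by simp)]
      simp only [List.length_map, List.length_range, Nat.sub_self]
      rw [hrep, List.replicate_succ, List.set_cons_zero]
    rw [hsetv, hsetv]
    conv_rhs => rw [List.range_succ, List.map_append]
    rw [List.append_assoc, List.map_singleton, List.singleton_append]
    have : pvEd s t (K+1) (k+1) = if s.getD K ' ' = t.getD k ' ' then pvEd s t K k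
        else 1 + min (min (pvEd s t K (k+1)) (pvEd s t (K+1) k)) (pvEd s t K k) := by
      rw [pvEd]
    rw [this]
    split_ifs <;> rfl

-- one inner-loop step of the main fill (Nat-indexed shape)
def pvP (s t : List Char) (K : Nat) (prev row : List Int) (j : Nat) : List Int :=
  if s.getD K ' ' = t.getD j ' ' then
    row.set (j+1) (prev.getD j 0)
  else
    row.set (j+1) (1 + min (min (prev.getD (j+1) 0) (row.getD j 0)) (prev.getD j 0))

lemma pvStage4 (s t : List Char) (K : Nat) (hK : K ≤ s.length) :
    (List.range K).foldl (fun mat (k : Nat) =>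
        (List.range t.length).foldl
          (fun m (j : Nat) => m.set (k+1) (pvP s t k (m.getD k []) (m.getD (k+1) []) j)) mat)
      (((List.range (t.length+1)).map (fun j => pvEd s t 0 j))
        :: (List.range s.length).map (fun (i : Nat) => ((i:Int)+1) :: List.replicate t.length 0))
    = (List.range (K+1)).map (fun i => (List.range (t.length+1)).map (fun j => pvEd s t i j))
      ++ ((List.range s.length).map (fun (i : Nat) => ((i:Int)+1) :: List.replicate t.length 0)).drop K := by
  induction K with
  | zero => simp
  | succ K ih =>
    rw [show List.range (K+1) = List.range K ++ [K] from List.range_succ,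
        List.foldl_append, ih (by omega)]
    simp only [List.foldl_cons, List.foldl_nil]
    set pre := (List.range (K+1)).map (fun i => (List.range (t.length+1)).map (fun j => pvEd s t i j)) with hpre
    set tl := (List.range s.length).map (fun (i : Nat) => ((i:Int)+1) :: List.replicate t.length 0) with htl
    have hKm : K < s.length := by omega
    have hlenpre : pre.length = K + 1 := by simp [hpre]
    have hlentl : tl.length = s.length := by simp [htl]
    have hmatlen : (pre ++ tl.drop K).length = s.length + 1 := by
      simp [hlenpre, hlentl]; omega
    have hdropK : tl.drop K = (((K:Int)+1) :: List.replicate t.length 0) :: tl.drop (K+1) := by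
      rw [List.drop_eq_getElem_cons (by omega)]
      congr 1
      simp [htl]
    have hr : (pre ++ tl.drop K) = (pre ++ tl.drop K).set (K+1) (((K:Int)+1) :: List.replicate t.length 0) := by
      rw [List.set_append_right _ _ (by omega), hlenpre, Nat.sub_self, hdropK, List.set_cons_zero]
    have hgK : (pre ++ tl.drop K).getD K [] = (List.range (t.length+1)).map (fun j => pvEd s t K j) := by
      rw [List.getD_eq_getElem?_getD, List.getElem?_append_left (by omega)]
      simp [hpre]
    conv_lhs => rw [hr]
    rw [pvRowFactor (pvP s t K) (List.range t.length) (pre ++ tl.drop K) K _ (by omega), hgK]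
    have hrow := pvRowCompute s t K t.length le_rfl
    simp only [pvP] at hrow ⊢
    rw [hrow]
    simp only [Nat.sub_self, List.replicate_zero, List.append_nil]
    rw [List.set_append_right _ _ (by omega), hlenpre, Nat.sub_self, hdropK, List.set_cons_zero]
    conv_rhs => rw [show List.range (K+1+1) = List.range (K+1) ++ [K+1] from List.range_succ, List.map_append]
    rw [List.append_assoc, List.map_singleton, List.singleton_append]

-- A computes the prefix edit distance
lemma pvA_eq_ed (str1 str2 : String) :
    calculate_min_edit_distance str1 str2 = pvEd str1.toList str2.toList str1.toList.length str2.toList.length := by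
  simp only [calculate_min_edit_distance]
  set s := str1.toList with hs
  set t := str2.toList with ht
  -- initial matrix
  have hM0 : (PySem.List.pyRange 0 ((s.length:Int)+1) 1).map (fun _ => List.replicate ((t.length:Int)+1).toNat (0:Int))
      = List.replicate (s.length+1) (List.replicate (t.length+1) (0:Int)) := by
    rw [PySem.List.pyRange_one]
    rw [show (((s.length:Int)+1) - 0).toNat = s.length + 1 by omega,
        show (((t.length:Int)+1)).toNat = t.length + 1 by omega]
    simp [Function.comp_def, List.map_const']
  rw [hM0]
  -- first init loop
  have h2 : (PySem.List.pyRange 0 ((s.length:Int)+1) 1).foldl (fun mat i => pvSet2 mat i 0 i)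
        (List.replicate (s.length+1) (List.replicate (t.length+1) (0:Int)))
      = (List.range (s.length+1)).map (fun (i : Nat) => (i:Int) :: List.replicate t.length 0) := by
    rw [PySem.List.pyRange_one,
        show (((s.length:Int)+1) - 0).toNat = s.length + 1 by omega, List.foldl_map]
    have hf : (fun (mat : List (List Int)) (k : Nat) => pvSet2 mat (0 + (k:Int)) 0 (0 + (k:Int)))
        = (fun mat (i : Nat) => mat.set i ((mat.getD i []).set 0 (i:Int))) := by
      funext mat k
      simp [pvSet2, PySem.List.pySetD_of_nonneg]
    rw [hf, pvStage2 s.length t.length (s.length+1) le_rfl]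
    simp
  rw [h2]
  -- second init loop (row 0)
  have h3 : (PySem.List.pyRange 0 ((t.length:Int)+1) 1).foldl (fun mat j => pvSet2 mat 0 j j)
        ((List.range (s.length+1)).map (fun (i : Nat) => (i:Int) :: List.replicate t.length 0))
      = ((List.range (t.length+1)).map (fun j => pvEd s t 0 j))
        :: (List.range s.length).map (fun (i : Nat) => ((i:Int)+1) :: List.replicate t.length 0) := by
    rw [PySem.List.pyRange_one,
        show (((t.length:Int)+1) - 0).toNat = t.length + 1 by omega, List.foldl_map]
    have hf : (fun (mat : List (List Int)) (k : Nat) => pvSet2 mat 0 (0 + (k:Int)) (0 + (k:Int)))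
        = (fun (mat : List (List Int)) (j : Nat) => mat.set 0 ((fun (row : List Int) (j : Nat) => row.set j (j:Int)) (mat.getD 0 []) j)) := by
      funext mat k
      simp [pvSet2, PySem.List.pySetD_of_nonneg, PySem.List.pyGetD_zero]
    rw [hf]
    rw [List.range_succ_eq_map, List.map_cons, List.map_map]
    simp only [Nat.cast_zero]
    rw [pvStage3 (List.range (t.length+1)) (fun (row : List Int) (j : Nat) => row.set j (j:Int))]
    rw [pvFoldlSetRange (fun j => (j:Int)) ((0:Int) :: List.replicate t.length 0) (t.length+1) (by simp)]
    congr 1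
    · simp only [List.drop_succ_cons, List.drop_replicate, Nat.sub_self,
        List.replicate_zero, List.append_nil]
      apply List.map_congr_left
      intro j _
      simp [pvEd]
  rw [h3]
  -- main fill
  have hfun : (fun (mat : List (List Int)) (k : Nat) =>
        (PySem.List.pyRange 1 ((t.length:Int)+1) 1).foldl (fun mat j =>
          if PySem.List.pyGetD s ((1+(k:Int))-1) ' ' = PySem.List.pyGetD t (j-1) ' ' then
            pvSet2 mat (1+(k:Int)) j (pvGet2 mat ((1+(k:Int))-1) (j-1))
          else
            pvSet2 mat (1+(k:Int)) j (1 + min (min (pvGet2 mat ((1+(k:Int))-1) j) (pvGet2 mat (1+(k:Int)) (j-1)))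
                                  (pvGet2 mat ((1+(k:Int))-1) (j-1)))) mat)
      = (fun mat (k : Nat) =>
        (List.range t.length).foldl
          (fun m (j : Nat) => m.set (k+1) (pvP s t k (m.getD k []) (m.getD (k+1) []) j)) mat) := by
    funext mat k
    rw [PySem.List.pyRange_one, show (((t.length:Int)+1) - 1).toNat = t.length by omega, List.foldl_map]
    congr 1
    funext m j
    have e1k : (1:Int)+(k:Int)-1 = (k:Int) := by ring
    have e1j : (1:Int)+(j:Int)-1 = (j:Int) := by ring
    have e2k : (1:Int)+(k:Int) = ((k+1:Nat):Int) := by push_cast; ring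
    have e2j : (1:Int)+(j:Int) = ((j+1:Nat):Int) := by push_cast; ring
    rw [e1k, e1j, e2k, e2j]
    simp only [pvSet2, pvGet2, pvP, PySem.List.pySetD_natCast, PySem.List.pyGetD_natCast]
    split_ifs <;> rfl
  rw [PySem.List.pyRange_one 1 ((s.length:Int)+1), show (((s.length:Int)+1) - 1).toNat = s.length by omega,
      List.foldl_map, hfun, pvStage4 s t s.length le_rfl]
  rw [show ((List.range s.length).map (fun (i : Nat) => ((i:Int)+1) :: List.replicate t.length 0)).drop s.length = [] from
        List.drop_eq_nil_of_le (by simp), List.append_nil]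
  simp only [pvGet2, PySem.List.pyGetD_natCast]
  rw [List.getD_eq_getElem _ _ (by simp)]
  simp

-- ---------- B-side proof: the stack machine computes pvEd ----------

-- the dependency list of an interior cell, exactly as Source B builds it
def pvDeps (s t : List Char) (p : Int × Int) : List (Int × Int) :=
  if PySem.List.pyGetD s (p.1 - 1) ' ' = PySem.List.pyGetD t (p.2 - 1) ' ' then
    [(p.1 - 1, p.2 - 1)]
  else
    [(p.1 - 1, p.2), (p.1, p.2 - 1), (p.1 - 1, p.2 - 1)]

-- the value a memo key must carry
def pvVal (s t : List Char) (p : Int × Int) : Int :=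
  pvEd s t p.1.toNat p.2.toNat

-- all legal subproblem keys
def pvGrid (m n : Nat) : List (Int × Int) :=
  (List.range (m+1)).flatMap (fun i => (List.range (n+1)).map (fun j => ((i:Int), (j:Int))))

lemma mem_pvGrid {m n : Nat} {p : Int × Int} :
    p ∈ pvGrid m n ↔ 0 ≤ p.1 ∧ p.1 ≤ m ∧ 0 ≤ p.2 ∧ p.2 ≤ n := by
  obtain ⟨a, b⟩ := p
  constructor
  · intro h
    simp [pvGrid] at h
    obtain ⟨i, hi, j, hj, h1, h2⟩ := h
    omega
  · intro h
    simp [pvGrid]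
    exact ⟨⟨a.toNat, by omega, by omega⟩, ⟨b.toNat, by omega, by omega⟩⟩

lemma length_pvGrid (m n : Nat) : (pvGrid m n).length = (m+1) * (n+1) := by
  simp [pvGrid]

-- the state invariant of Source B's loop
structure PvInv (s t : List Char) (memo : PySem.Dict (Int × Int) Int)
    (exp : PySem.Set (Int × Int)) (stack : List (Int × Int)) : Prop where
  mval : ∀ p v, memo.get? p = some v → p ∈ pvGrid s.length t.length ∧ v = pvVal s t p
  mnodup : memo.keys.Nodup
  enodup : exp.Nodup
  egrid : ∀ p ∈ exp, p ∈ pvGrid s.length t.length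
  sgrid : ∀ p ∈ stack, p ∈ pvGrid s.length t.length
  ssort : stack.Pairwise (fun a b => a.1 + a.2 ≤ b.1 + b.2)
  estack : ∀ p ∈ exp, memo.contains p = false → p ∈ stack
  jdeps : ∀ pre c post, stack = pre ++ c :: post → c ∈ exp → memo.contains c = false →
            ∀ d ∈ pvDeps s t c, memo.contains d = true ∨ d ∈ pre

-- the step measure: every reachable step strictly decreases it
def pvMu (m n : Nat) (memo : PySem.Dict (Int × Int) Int)
    (exp : PySem.Set (Int × Int)) (stack : List (Int × Int)) : Nat :=
  ((m+1)*(n+1) - memo.size) + 4*((m+1)*(n+1) - exp.length) + stack.length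

lemma pvRun_nil (s t : List Char) (fuel : Nat) (memo : PySem.Dict (Int × Int) Int)
    (exp : PySem.Set (Int × Int)) :
    pvRun s t (fuel+1) memo exp [] = memo := rfl

lemma pvRun_cons (s t : List Char) (fuel : Nat) (memo : PySem.Dict (Int × Int) Int)
    (exp : PySem.Set (Int × Int)) (p : Int × Int) (rest : List (Int × Int)) :
    pvRun s t (fuel+1) memo exp (p :: rest) =
    if memo.contains p then
      pvRun s t fuel memo exp rest
    else if p.1 = 0 then
      pvRun s t fuel (memo.insert p p.2) exp rest
    else if p.2 = 0 then
      pvRun s t fuel (memo.insert p p.1) exp rest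
    else
      if (pvDeps s t p).filter (fun d => !memo.contains d) ≠ [] ∧ PySem.Set.contains exp p = false then
        pvRun s t fuel memo (PySem.Set.add exp p)
          (((pvDeps s t p).filter (fun d => !memo.contains d)).reverse ++ p :: rest)
      else if (pvDeps s t p).length = 1 then
        pvRun s t fuel (memo.insert p (memo.getD ((pvDeps s t p).getD 0 (0, 0)) 0)) exp rest
      else
        pvRun s t fuel (memo.insert p (1 + min (min (memo.getD ((pvDeps s t p).getD 0 (0, 0)) 0)
                                                    (memo.getD ((pvDeps s t p).getD 1 (0, 0)) 0))
                                               (memo.getD ((pvDeps s t p).getD 2 (0, 0)) 0))) exp rest := rfl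

-- every dependency is one of the three neighbouring cells
lemma pvDeps_cases {s t : List Char} {p d : Int × Int} (h : d ∈ pvDeps s t p) :
    d = (p.1 - 1, p.2) ∨ d = (p.1, p.2 - 1) ∨ d = (p.1 - 1, p.2 - 1) := by
  unfold pvDeps at h
  split at h <;> simp at h <;> tauto

lemma pvDeps_sum {s t : List Char} {p d : Int × Int} (h : d ∈ pvDeps s t p) :
    d.1 + d.2 < p.1 + p.2 := by
  rcases pvDeps_cases h with h | h | h <;> subst h <;> simp <;> omega

lemma pvDeps_grid {s t : List Char} {p d : Int × Int}
    (hp : p ∈ pvGrid s.length t.length) (h1 : p.1 ≠ 0) (h2 : p.2 ≠ 0)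
    (h : d ∈ pvDeps s t p) : d ∈ pvGrid s.length t.length := by
  rw [mem_pvGrid] at hp ⊢
  rcases pvDeps_cases h with h | h | h <;> subst h <;> simp <;> omega

-- the recurrence, stated on Int grid points
lemma pvVal_rec {s t : List Char} {p : Int × Int}
    (hp : p ∈ pvGrid s.length t.length) (h1 : p.1 ≠ 0) (h2 : p.2 ≠ 0) :
    pvVal s t p =
      if PySem.List.pyGetD s (p.1 - 1) ' ' = PySem.List.pyGetD t (p.2 - 1) ' ' then
        pvVal s t (p.1 - 1, p.2 - 1)
      else 1 + min (min (pvVal s t (p.1 - 1, p.2)) (pvVal s t (p.1, p.2 - 1)))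
                   (pvVal s t (p.1 - 1, p.2 - 1)) := by
  rw [mem_pvGrid] at hp
  obtain ⟨hp1, hp2, hp3, hp4⟩ := hp
  have hi : p.1.toNat = (p.1 - 1).toNat + 1 := by omega
  have hj : p.2.toNat = (p.2 - 1).toNat + 1 := by omega
  have hs : PySem.List.pyGetD s (p.1 - 1) ' ' = s.getD (p.1 - 1).toNat ' ' := by
    rw [PySem.List.pyGetD_eq_getElem s ' ' (by omega) (by omega),
        List.getD_eq_getElem _ _ (by omega)]
  have ht : PySem.List.pyGetD t (p.2 - 1) ' ' = t.getD (p.2 - 1).toNat ' ' := by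
    rw [PySem.List.pyGetD_eq_getElem t ' ' (by omega) (by omega),
        List.getD_eq_getElem _ _ (by omega)]
  simp only [pvVal]
  rw [hi, hj, pvEd, hs, ht]

lemma pvVal_base1 {s t : List Char} {p : Int × Int}
    (hp : p ∈ pvGrid s.length t.length) (h1 : p.1 = 0) : pvVal s t p = p.2 := by
  rw [mem_pvGrid] at hp
  simp only [pvVal, h1, Int.toNat_zero, pvEd]
  omega

lemma pvVal_base2 {s t : List Char} {p : Int × Int}
    (hp : p ∈ pvGrid s.length t.length) (h1 : p.1 ≠ 0) (h2 : p.2 = 0) : pvVal s t p = p.1 := by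
  rw [mem_pvGrid] at hp
  have hi : p.1.toNat = (p.1 - 1).toNat + 1 := by omega
  simp only [pvVal, h2, Int.toNat_zero, hi, pvEd]
  omega

-- counting: a Nodup list of grid points is no longer than the grid
lemma pvCount {l : List (Int × Int)} {m n : Nat} (hn : l.Nodup)
    (hs : ∀ x ∈ l, x ∈ pvGrid m n) : l.length ≤ (m+1) * (n+1) := by
  have h := (List.subperm_of_subset hn hs).length_le
  rwa [length_pvGrid] at h

lemma pvContains_get? {memo : PySem.Dict (Int × Int) Int} {p : Int × Int} :
    memo.contains p = true ↔ ∃ v, memo.get? p = some v := by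
  rw [PySem.Dict.contains_eq_isSome_get?]
  cases memo.get? p <;> simp

lemma pvNotContains_get? {memo : PySem.Dict (Int × Int) Int} {p : Int × Int} :
    memo.contains p = false ↔ memo.get? p = none := by
  rw [PySem.Dict.contains_eq_isSome_get?]
  cases memo.get? p <;> simp

-- memo size bound from the invariant
lemma pvSizeLe {s t : List Char} {memo : PySem.Dict (Int × Int) Int}
    (h : ∀ p v, memo.get? p = some v → p ∈ pvGrid s.length t.length ∧ v = pvVal s t p)
    (hn : memo.keys.Nodup) : memo.size ≤ (s.length+1) * (t.length+1) := by
  have hlen : memo.keys.length ≤ (s.length+1) * (t.length+1) := by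
    apply pvCount hn
    intro x hx
    cases hg : memo.get? x with
    | none => exact absurd ((PySem.Dict.get?_eq_none_iff_not_mem_keys _ _).mp hg) (by simp [hx])
    | some v => exact (h x v hg).1
  simpa [PySem.Dict.keys, PySem.Dict.size] using hlen

-- ===== invariant preservation =====

lemma pvInv_pop {s t : List Char} {memo exp} {p : Int × Int} {rest}
    (hI : PvInv s t memo exp (p :: rest)) (hc : memo.contains p = true) :
    PvInv s t memo exp rest := by
  obtain ⟨mval, mnodup, enodup, egrid, sgrid, ssort, estack, jdeps⟩ := hI
  refine ⟨mval, mnodup, enodup, egrid, fun q hq => sgrid q (List.mem_cons_of_mem _ hq),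
    (List.pairwise_cons.mp ssort).2, ?_, ?_⟩
  · intro q hq hqc
    rcases List.mem_cons.mp (estack q hq hqc) with he | hm
    · rw [he] at hqc; rw [hqc] at hc; cases hc
    · exact hm
  · intro pre c post hdec hce hcc d hd
    rcases jdeps (p :: pre) c post (by rw [hdec]; rfl) hce hcc d hd with hcd | hm
    · exact Or.inl hcd
    · rcases List.mem_cons.mp hm with he | hm
      · exact Or.inl (he ▸ hc)
      · exact Or.inr hm

lemma pvInv_insert {s t : List Char} {memo exp} {p : Int × Int} {rest} {v : Int}
    (hI : PvInv s t memo exp (p :: rest)) (hnc : memo.contains p = false)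
    (hv : v = pvVal s t p) :
    PvInv s t (memo.insert p v) exp rest := by
  obtain ⟨mval, mnodup, enodup, egrid, sgrid, ssort, estack, jdeps⟩ := hI
  have hpg : p ∈ pvGrid s.length t.length := sgrid p (List.mem_cons_self ..)
  refine ⟨?_, PySem.Dict.nodup_keys_insert _ _ _ mnodup, enodup, egrid,
    fun q hq => sgrid q (List.mem_cons_of_mem _ hq), (List.pairwise_cons.mp ssort).2, ?_, ?_⟩
  · intro q w hq
    rw [PySem.Dict.get?_insert] at hq
    split at hq
    · next he => cases hq; exact ⟨he ▸ hpg, he ▸ hv⟩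
    · exact mval q w hq
  · intro q hq hqc
    rw [PySem.Dict.contains_insert, Bool.or_eq_false_iff] at hqc
    have hne : q ≠ p := by
      intro he
      have := hqc.1
      rw [he] at this
      simp at this
    rcases List.mem_cons.mp (estack q hq hqc.2) with he | hm
    · exact absurd he hne
    · exact hm
  · intro pre c post hdec hce hcc d hd
    rw [PySem.Dict.contains_insert, Bool.or_eq_false_iff] at hcc
    rcases jdeps (p :: pre) c post (by rw [hdec]; rfl) hce hcc.2 d hd with hcd | hm
    · exact Or.inl (by rw [PySem.Dict.contains_insert, hcd]; simp)
    · rcases List.mem_cons.mp hm with he | hm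
      · exact Or.inl (by rw [PySem.Dict.contains_insert, he]; simp)
      · exact Or.inr hm

lemma pvInv_expand {s t : List Char} {memo exp} {p : Int × Int} {rest}
    (hI : PvInv s t memo exp (p :: rest)) (hnc : memo.contains p = false)
    (h1 : p.1 ≠ 0) (h2 : p.2 ≠ 0) (hx : PySem.Set.contains exp p = false) :
    PvInv s t memo (PySem.Set.add exp p)
      (((pvDeps s t p).filter (fun d => !memo.contains d)).reverse ++ p :: rest) := by
  obtain ⟨mval, mnodup, enodup, egrid, sgrid, ssort, estack, jdeps⟩ := hI
  have hpg : p ∈ pvGrid s.length t.length := sgrid p (List.mem_cons_self ..)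
  have hpe : p ∉ exp := by
    intro h
    rw [(PySem.Set.contains_iff _ _).2 h] at hx
    cases hx
  have hmiss : ∀ d ∈ ((pvDeps s t p).filter (fun d => !memo.contains d)).reverse,
      d ∈ pvDeps s t p ∧ memo.contains d = false := by
    intro d hd
    rw [List.mem_reverse, List.mem_filter] at hd
    exact ⟨hd.1, by simpa using hd.2⟩
  -- no missing dependency is anywhere on the old stack (stack sums are ≥ p's sum)
  have hnostack : ∀ d ∈ ((pvDeps s t p).filter (fun d => !memo.contains d)).reverse,
      d ∉ p :: rest := by
    intro d hd hmem
    have hsum : d.1 + d.2 < p.1 + p.2 := pvDeps_sum (hmiss d hd).1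
    rcases List.mem_cons.mp hmem with he | hmem
    · rw [he] at hsum; omega
    · have := (List.pairwise_cons.mp ssort).1 d hmem
      omega
  refine ⟨mval, mnodup, PySem.Set.nodup_add _ _ enodup, ?_, ?_, ?_, ?_, ?_⟩
  · intro q hq
    rcases (PySem.Set.mem_add _ _ _).mp hq with hq | hq
    · exact egrid q hq
    · exact hq ▸ hpg
  · intro q hq
    rcases List.mem_append.mp hq with hq | hq
    · exact pvDeps_grid hpg h1 h2 (hmiss q hq).1
    · exact sgrid q hq
  · rw [List.pairwise_append]
    refine ⟨?_, ssort, ?_⟩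
    · have hrevp : ((pvDeps s t p).reverse).Pairwise (fun (a b : Int × Int) => a.1 + a.2 ≤ b.1 + b.2) := by
        unfold pvDeps
        split <;> simp <;> omega
      exact hrevp.sublist (List.filter_sublist).reverse
    · intro a ha b hb
      have hsa : a.1 + a.2 < p.1 + p.2 := pvDeps_sum (hmiss a ha).1
      rcases List.mem_cons.mp hb with he | hb
      · rw [he]; omega
      · have := (List.pairwise_cons.mp ssort).1 b hb
        omega
  · intro q hq hqc
    rcases (PySem.Set.mem_add _ _ _).mp hq with hq | hq
    · exact List.mem_append_right _ (estack q hq hqc)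
    · exact hq ▸ List.mem_append_right _ (List.mem_cons_self ..)
  · intro pre c post hdec hce hcc d hd
    have hce' := (PySem.Set.mem_add _ _ _).mp hce
    -- every dependency of p is memoized or among the pushed block
    have hdm : ∀ e ∈ pvDeps s t p, memo.contains e = true ∨
        e ∈ ((pvDeps s t p).filter (fun d => !memo.contains d)).reverse := by
      intro e he
      by_cases hec : memo.contains e
      · exact Or.inl hec
      · exact Or.inr (by rw [List.mem_reverse, List.mem_filter]; exact ⟨he, by simp [hec]⟩)
    rcases List.append_eq_append_iff.mp hdec with ⟨a', ha1, ha2⟩ | ⟨c', hc1, hc2⟩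
    · -- pre = miss ++ a'  and  p :: rest = a' ++ c :: post
      cases a' with
      | nil =>
        -- c = p: its dependencies are memoized or pushed (and the pushed block is pre)
        simp only [List.nil_append] at ha2
        have hcp : c = p := (List.cons_eq_cons.mp ha2).1.symm
        have hpre : pre = ((pvDeps s t p).filter (fun d => !memo.contains d)).reverse := by
          simpa using ha1
        subst hcp
        rcases hdm d hd with hcd | hm
        · exact Or.inl hcd
        · exact Or.inr (by rw [hpre]; exact hm)
      | cons q a'' =>
        -- c lies in the old rest (or equals p again); pre contains the whole pushed block and p
        have hq : p = q ∧ rest = a'' ++ c :: post := List.cons_eq_cons.mp ha2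
        rcases hce' with hcx | hcp
        · -- c ∈ exp: the old invariant applies
          rcases jdeps (p :: a'') c post (by rw [hq.2]; rfl) hcx hcc d hd with hcd | hm
          · exact Or.inl hcd
          · rcases List.mem_cons.mp hm with he | hm
            · exact Or.inr (by rw [ha1, he, hq.1]; exact List.mem_append_right _ (List.mem_cons_self ..))
            · exact Or.inr (by rw [ha1]; exact List.mem_append_right _ (List.mem_cons_of_mem _ hm))
        · -- c = p: its dependencies are memoized or pushed, and the pushed block is in pre
          subst hcp
          rcases hdm d hd with hcd | hm
          · exact Or.inl hcd
          · exact Or.inr (by rw [ha1]; exact List.mem_append_left _ hm)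
    · -- miss = pre ++ c'  and  c :: post = c' ++ p :: rest
      cases c' with
      | nil =>
        -- c = p, pre = the whole pushed block
        simp only [List.nil_append] at hc2
        have hcp : c = p := (List.cons_eq_cons.mp hc2).1
        have hpre : pre = ((pvDeps s t p).filter (fun d => !memo.contains d)).reverse := by
          simpa using hc1.symm
        subst hcp
        rcases hdm d hd with hcd | hm
        · exact Or.inl hcd
        · exact Or.inr (by rw [hpre]; exact hm)
      | cons e c'' =>
        -- c sits strictly inside the pushed block: impossible
        exfalso
        have hcm : c ∈ ((pvDeps s t p).filter (fun d => !memo.contains d)).reverse := by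
          have hce2 : c = e := (List.cons_eq_cons.mp hc2).1
          rw [hc1, hce2]
          exact List.mem_append_right _ (List.mem_cons_self ..)
        rcases hce' with hq | hq
        · exact hnostack c hcm (estack c hq hcc)
        · have := pvDeps_sum (hmiss c hcm).1
          rw [hq] at this; omega

-- main lemma: with enough fuel the machine memoizes everything on the stack, correctly
lemma pvRun_correct (s t : List Char) (fuel : Nat) :
    ∀ (memo : PySem.Dict (Int × Int) Int) (exp : PySem.Set (Int × Int)) (stack : List (Int × Int)),
    PvInv s t memo exp stack →
    pvMu s.length t.length memo exp stack ≤ fuel →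
    (∀ p v, memo.get? p = some v → (pvRun s t fuel memo exp stack).get? p = some v) ∧
    (∀ p ∈ stack, ((pvRun s t fuel memo exp stack).get? p).isSome) ∧
    (∀ p v, (pvRun s t fuel memo exp stack).get? p = some v → v = pvVal s t p) := by
  induction fuel with
  | zero =>
    intro memo exp stack hI hmu
    have hstack : stack = [] := by
      have : stack.length = 0 := by unfold pvMu at hmu; omega
      exact List.length_eq_zero_iff.mp this
    subst hstack
    exact ⟨fun p v h => h, by simp, fun p v h => (hI.mval p v h).2⟩
  | succ fuel ih =>
    intro memo exp stack hI hmu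
    match stack with
    | [] =>
      rw [pvRun_nil]
      exact ⟨fun p v h => h, by simp, fun p v h => (hI.mval p v h).2⟩
    | p :: rest =>
      rw [pvRun_cons]
      have hC : memo.size ≤ (s.length+1) * (t.length+1) := pvSizeLe hI.mval hI.mnodup
      have hpg : p ∈ pvGrid s.length t.length := hI.sgrid p (List.mem_cons_self ..)
      by_cases hc : memo.contains p
      · -- already memoized: pop
        rw [if_pos hc]
        have hmu' : pvMu s.length t.length memo exp rest ≤ fuel := by
          simp only [pvMu, List.length_cons] at hmu ⊢; omega
        obtain ⟨C1, C2, C3⟩ := ih memo exp rest (pvInv_pop hI hc) hmu'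
        refine ⟨C1, ?_, C3⟩
        intro q hq
        rcases List.mem_cons.mp hq with he | hm
        · obtain ⟨v, hv⟩ := pvContains_get?.mp (he ▸ hc)
          rw [C1 q v hv]; rfl
        · exact C2 q hm
      · -- not memoized: every branch that memoizes p shares this skeleton
        rw [if_neg hc]
        have hc' : memo.contains p = false := by simpa using hc
        have hkey : ∀ v : Int, v = pvVal s t p →
            (∀ q w, memo.get? q = some w → (pvRun s t fuel (memo.insert p v) exp rest).get? q = some w) ∧
            (∀ q ∈ p :: rest, ((pvRun s t fuel (memo.insert p v) exp rest).get? q).isSome) ∧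
            (∀ q w, (pvRun s t fuel (memo.insert p v) exp rest).get? q = some w → w = pvVal s t q) := by
          intro v hv
          have hI' := pvInv_insert hI hc' hv
          have hsz : (memo.insert p v).size = memo.size + 1 := by
            rw [PySem.Dict.size_insert, if_neg (by simp [hc'])]
          have hsz2 : (memo.insert p v).size ≤ (s.length+1) * (t.length+1) :=
            pvSizeLe hI'.mval hI'.mnodup
          have hmu' : pvMu s.length t.length (memo.insert p v) exp rest ≤ fuel := by
            simp only [pvMu, List.length_cons, hsz] at hmu hsz2 ⊢; omega
          obtain ⟨C1, C2, C3⟩ := ih (memo.insert p v) exp rest hI' hmu'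
          refine ⟨?_, ?_, C3⟩
          · intro q w hq
            apply C1
            rw [PySem.Dict.get?_insert]
            rw [if_neg ?_]
            · exact hq
            · intro he
              rw [he, pvNotContains_get?.mp hc'] at hq
              cases hq
          · intro q hq
            rcases List.mem_cons.mp hq with he | hm
            · rw [C1 q v (by rw [he]; exact PySem.Dict.get?_insert_self ..)]; rfl
            · exact C2 q hm
        by_cases h1 : p.1 = 0
        · rw [if_pos h1]
          exact hkey p.2 (pvVal_base1 hpg h1).symm
        · rw [if_neg h1]
          by_cases h2 : p.2 = 0
          · rw [if_pos h2]
            exact hkey p.1 (pvVal_base2 hpg h1 h2).symm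
          · rw [if_neg h2]
            by_cases hms : (pvDeps s t p).filter (fun d => !memo.contains d) ≠ [] ∧
                PySem.Set.contains exp p = false
            · -- expand: push the missing dependencies
              rw [if_pos hms]
              have hI' := pvInv_expand hI hc' h1 h2 hms.2
              have hpne : p ∉ exp := by
                intro h
                rw [(PySem.Set.contains_iff _ _).2 h] at hms
                exact absurd hms.2 (by simp)
              have hel : (PySem.Set.add exp p).length = exp.length + 1 := by
                rw [PySem.Set.add_of_not_mem hpne]; simp
              have hel2 : (PySem.Set.add exp p).length ≤ (s.length+1) * (t.length+1) :=
                pvCount hI'.enodup hI'.egrid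
              have hml : ((pvDeps s t p).filter (fun d => !memo.contains d)).length ≤ 3 := by
                have h3 : (pvDeps s t p).length ≤ 3 := by
                  unfold pvDeps; split <;> simp
                have := List.length_filter_le (fun d => !memo.contains d) (pvDeps s t p)
                omega
              have hmu' : pvMu s.length t.length memo (PySem.Set.add exp p)
                  (((pvDeps s t p).filter (fun d => !memo.contains d)).reverse ++ p :: rest) ≤ fuel := by
                simp only [pvMu, List.length_cons, List.length_append, List.length_reverse, hel] at hmu hel2 ⊢
                omega
              obtain ⟨C1, C2, C3⟩ := ih memo (PySem.Set.add exp p) _ hI' hmu'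
              refine ⟨C1, ?_, C3⟩
              intro q hq
              exact C2 q (List.mem_append_right _ hq)
            · -- all dependencies are memoized: compute p's value
              rw [if_neg hms]
              have hall : ∀ d ∈ pvDeps s t p, memo.contains d = true := by
                by_cases hme : (pvDeps s t p).filter (fun d => !memo.contains d) = []
                · intro d hd
                  have := List.filter_eq_nil_iff.mp hme d hd
                  simpa using this
                · -- filter nonempty forces p ∈ exp, and then jdeps at the top of the stack gives a contradiction
                  exfalso
                  have hxp : PySem.Set.contains exp p = true := by
                    rcases Bool.eq_false_or_eq_true (PySem.Set.contains exp p) with h | h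
                    · exact h
                    · exact absurd ⟨hme, h⟩ hms
                  have hpe : p ∈ exp := (PySem.Set.contains_iff _ _).1 hxp
                  have hj := hI.jdeps [] p rest rfl hpe hc'
                  apply hme
                  rw [List.filter_eq_nil_iff]
                  intro d hd
                  rcases hj d hd with hcd | hin
                  · simp [hcd]
                  · cases hin
              have hgetD : ∀ d ∈ pvDeps s t p, memo.getD d 0 = pvVal s t d := by
                intro d hd
                obtain ⟨w, hw⟩ := pvContains_get?.mp (hall d hd)
                rw [PySem.Dict.getD_eq_get?_getD, hw]
                exact (hI.mval d w hw).2
              have hrec := pvVal_rec hpg h1 h2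
              by_cases hch : PySem.List.pyGetD s (p.1 - 1) ' ' = PySem.List.pyGetD t (p.2 - 1) ' '
              · -- characters match: single dependency
                have hdeps : pvDeps s t p = [(p.1 - 1, p.2 - 1)] := by
                  unfold pvDeps; rw [if_pos hch]
                rw [if_pos (by rw [hdeps]; rfl)]
                apply hkey
                rw [hdeps]
                simp only [List.getD_cons_zero]
                rw [hgetD (p.1 - 1, p.2 - 1) (by rw [hdeps]; exact List.mem_cons_self ..), hrec, if_pos hch]
              · -- characters differ: three dependencies
                have hdeps : pvDeps s t p = [(p.1 - 1, p.2), (p.1, p.2 - 1), (p.1 - 1, p.2 - 1)] := by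
                  unfold pvDeps; rw [if_neg hch]
                rw [if_neg (by rw [hdeps]; simp)]
                apply hkey
                rw [hdeps]
                simp only [List.getD_cons_zero, List.getD_cons_succ]
                rw [hgetD (p.1 - 1, p.2) (by rw [hdeps]; simp),
                    hgetD (p.1, p.2 - 1) (by rw [hdeps]; simp),
                    hgetD (p.1 - 1, p.2 - 1) (by rw [hdeps]; simp),
                    hrec, if_neg hch]

-- B computes the prefix edit distance
lemma pvB_eq_ed (str1 str2 : String) :
    calculate_min_edit_distance_alt str1 str2 = pvEd str1.toList str2.toList str1.toList.length str2.toList.length := by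
  simp only [calculate_min_edit_distance_alt]
  have hI : PvInv str1.toList str2.toList PySem.Dict.empty PySem.Set.empty
      [((str1.toList.length : Int), (str2.toList.length : Int))] := by
    refine ⟨?_, ?_, ?_, ?_, ?_, ?_, ?_, ?_⟩
    · intro p v h
      rw [PySem.Dict.get?_empty] at h
      cases h
    · exact PySem.Dict.nodup_keys_empty ..
    · exact List.nodup_nil
    · intro p h
      cases h
    · intro p h
      rcases List.mem_cons.mp h with he | hm
      · rw [he, mem_pvGrid]
        refine ⟨by omega, by omega, by omega, by omega⟩
      · cases hm
    · exact List.pairwise_singleton ..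
    · intro p h
      cases h
    · intro pre c post hdec hce
      cases hce
  have hmu : pvMu str1.toList.length str2.toList.length PySem.Dict.empty PySem.Set.empty
      [((str1.toList.length : Int), (str2.toList.length : Int))]
      ≤ 5 * (str1.toList.length + 1) * (str2.toList.length + 1) + 1 := by
    have hr : 5 * (str1.toList.length + 1) * (str2.toList.length + 1)
        = 5 * ((str1.toList.length + 1) * (str2.toList.length + 1)) := by ring
    unfold pvMu
    rw [hr, PySem.Dict.size_empty]
    have hset : (PySem.Set.empty : PySem.Set (Int × Int)).length = 0 := rfl
    rw [hset]
    simp only [List.length_cons, List.length_nil]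
    set K := (str1.toList.length + 1) * (str2.toList.length + 1) with hK
    omega
  obtain ⟨C1, C2, C3⟩ := pvRun_correct str1.toList str2.toList
    (5 * (str1.toList.length + 1) * (str2.toList.length + 1) + 1)
    PySem.Dict.empty PySem.Set.empty
    [((str1.toList.length : Int), (str2.toList.length : Int))] hI hmu
  obtain ⟨v, hv⟩ := Option.isSome_iff_exists.mp
    (C2 ((str1.toList.length : Int), (str2.toList.length : Int)) (List.mem_cons_self ..))
  rw [PySem.Dict.getD_eq_get?_getD, hv]
  simp only [Option.getD_some]
  rw [C3 _ v hv]
  simp [pvVal]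

-- ===== VERDICT (by name: the statement is the Claim_ definition above) =====
theorem calculate_min_edit_distance_spec : Claim_equal_calculate_min_edit_distance := by
  intro str1 str2 _
  unfold Spec_calculate_min_edit_distance
  rw [pvA_eq_ed, pvB_eq_ed]
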